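-- pv_equiv track=rewrite | github.com/konfou/minidist-rs | scripts/gen-fake-csv.py | infer_int_range
-- ===== SOURCE A (Python) =====
-- def lname(name):
--     return name.lower()
--
-- def is_money_field(name):
--     return any(
--         k in lname(name)
--         for k in [
--             "amount",
--             "price",
--             "total",
--             "cost",
--             "balance",
--             "fee",
--             "salary",
--             "revenue",
--             "income",
--             "expense",
--         ]
--     )
--
-- def infer_int_range(name):
--     n = lname(name)
--
--     if "age" in n:
--         return 0, 100
--
--     if is_money_field(name):
--         return 0, 10_000
--
--     if any(k in n for k in ["count", "qty", "quantity", "num", "items"]):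
--         return 0, 1_000
--
--     if any(k in n for k in ["rank", "level", "score"]):
--         return 1, 10
--
--     if "year" in n:
--         return 1990, 2030
--
--     return 0, 10_000
-- ===== SOURCE B (Python) =====
-- # Different algorithm: instead of testing each keyword for containment, scan every
-- # substring of the lowercased name (at each position, each keyword length) and look it
-- # up in a keyword->priority hash table, keeping the minimum priority; index a range table.
-- _RANGES = [(0, 100), (0, 10_000), (0, 1_000), (1, 10), (1990, 2030), (0, 10_000)]
-- _KW = {k: p for p, kws in enumerate([
--     ["age"],
--     ["amount", "price", "total", "cost", "balance", "fee",
--      "salary", "revenue", "income", "expense"],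
--     ["count", "qty", "quantity", "num", "items"],
--     ["rank", "level", "score"],
--     ["year"],
-- ]) for k in kws}
-- _LENS = sorted({len(k) for k in _KW})
--
--
-- def infer_int_range(name):
--     n = name.lower()
--     best = len(_RANGES) - 1          # index of the default range
--     for i in range(len(n)):
--         for L in _LENS:
--             p = _KW.get(n[i:i + L])
--             if p is not None and p < best:
--                 best = p
--     return _RANGES[best]
-- ===== Notes on version B (the rewrite author's own statement) =====
-- stated objective: alternative
-- what changed: Instead of testing each keyword group for containment in order, B enumerates the substrings of the lowercased name (each position, each keyword length), looks them up in a keyword-to-priority dict, keeps the minimum priority seen, and indexes a range table (default last), which yields the same first-matching-group range.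
import Mathlib
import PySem

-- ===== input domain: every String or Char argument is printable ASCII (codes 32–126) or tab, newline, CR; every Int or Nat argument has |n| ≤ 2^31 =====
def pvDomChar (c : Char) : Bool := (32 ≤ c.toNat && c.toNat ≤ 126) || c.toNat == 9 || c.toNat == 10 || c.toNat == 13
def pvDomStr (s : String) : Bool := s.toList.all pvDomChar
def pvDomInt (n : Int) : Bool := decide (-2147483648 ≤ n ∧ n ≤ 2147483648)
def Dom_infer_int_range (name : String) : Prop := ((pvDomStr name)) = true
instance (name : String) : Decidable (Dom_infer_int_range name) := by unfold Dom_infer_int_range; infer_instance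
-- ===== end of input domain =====

-- B replaces A's ordered per-keyword containment tests by a scan over the name's own
-- substrings looked up in a keyword→priority dict, keeping the minimum priority
-- (alternative algorithm, same observable result).

-- ===== PORT A =====
def lname (name : String) : String := PySem.Str.lower name

def is_money_field (name : String) : Bool :=
  ["amount", "price", "total", "cost", "balance", "fee",
   "salary", "revenue", "income", "expense"].any
    (fun k => PySem.Str.isIn k (lname name))

def infer_int_range (name : String) : Int × Int :=
  let n := lname name
  if PySem.Str.isIn "age" n then (0, 100)
  else if is_money_field name then (0, 10000)
  else if ["count", "qty", "quantity", "num", "items"].any (fun k => PySem.Str.isIn k n) then (0, 1000)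
  else if ["rank", "level", "score"].any (fun k => PySem.Str.isIn k n) then (1, 10)
  else if PySem.Str.isIn "year" n then (1990, 2030)
  else (0, 10000)

-- ===== PORT B =====
def pvRanges : List (Int × Int) :=
  [(0, 100), (0, 10000), (0, 1000), (1, 10), (1990, 2030), (0, 10000)]

def pvKW : PySem.Dict String Int := PySem.Dict.ofList
  [("age", 0),
   ("amount", 1), ("price", 1), ("total", 1), ("cost", 1), ("balance", 1),
   ("fee", 1), ("salary", 1), ("revenue", 1), ("income", 1), ("expense", 1),
   ("count", 2), ("qty", 2), ("quantity", 2), ("num", 2), ("items", 2),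
   ("rank", 3), ("level", 3), ("score", 3),
   ("year", 4)]

def pvLens : List Int := [3, 4, 5, 6, 7, 8]   -- sorted({len(k) for k in _KW})

def infer_int_range_alt (name : String) : Int × Int :=
  let n := PySem.Str.lower name
  let best := (PySem.List.pyRange 0 (PySem.Str.len n) 1).foldl
    (fun best i => pvLens.foldl
      (fun best L =>
        match pvKW.get? (PySem.Str.slice n (some i) (some (i + L))) with
        | some p => if p < best then p else best
        | none => best) best) 5
  PySem.List.pyGetD pvRanges best (0, 0)

-- ===== PRECONDITION & SPEC =====
def Spec_infer_int_range (name : String) (out : Int × Int) : Prop := out = infer_int_range_alt name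
instance (name : String) (out : Int × Int) : Decidable (Spec_infer_int_range name out) := by unfold Spec_infer_int_range; infer_instance

-- ===== CLAIM (what is proved, stated in full; the proofs are below) =====
def Claim_equal_infer_int_range : Prop := ∀ (name : String), Dom_infer_int_range name → Spec_infer_int_range name (infer_int_range name)

-- ===== LEMMAS AND PROOFS =====

-- pvKW's items as a plain association list, for membership reasoning
def pvPairs : List (String × Int) :=
  [("age", 0),
   ("amount", 1), ("price", 1), ("total", 1), ("cost", 1), ("balance", 1),
   ("fee", 1), ("salary", 1), ("revenue", 1), ("income", 1), ("expense", 1),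
   ("count", 2), ("qty", 2), ("quantity", 2), ("num", 2), ("items", 2),
   ("rank", 3), ("level", 3), ("score", 3),
   ("year", 4)]

-- the candidate priorities B's scan offers to the running minimum
def pvCands (n : String) : List Int :=
  (List.range n.toList.length).flatMap (fun (k : Nat) =>
    pvLens.filterMap (fun L => pvKW.get? (PySem.Str.slice n (some (k : Int)) (some ((k : Int) + L)))))

lemma pvKW_get?_iff (s : String) (p : Int) :
    pvKW.get? s = some p ↔ (s, p) ∈ pvPairs := by
  have h : pvKW = PySem.Dict.mk pvPairs := by decide
  rw [h]
  have := PySem.Dict.get?_eq_some_iff_mem_items (d := PySem.Dict.mk pvPairs) (k := s) (v := p) (by decide)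
  simpa [PySem.Dict.items] using this

lemma pvPairs_facts :
    ∀ pr ∈ pvPairs, pr.1.toList ≠ [] ∧ ((pr.1.toList.length : Int) ∈ pvLens) ∧ 0 ≤ pr.2 ∧ pr.2 ≤ 4 := by
  decide

lemma pv_foldl_match_filterMap {α : Type} (h : α → Option Int) (l : List α) (b : Int) :
    l.foldl (fun b x => match h x with | some p => if p < b then p else b | none => b) b
      = (l.filterMap h).foldl min b := by
  induction l generalizing b with
  | nil => rfl
  | cons x t ih =>
    cases hx : h x with
    | none => simp [List.foldl_cons, hx, ih]
    | some p =>
      simp only [List.foldl_cons, hx, List.filterMap_cons, ih]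
      congr 1
      rw [min_def]
      split_ifs <;> omega

lemma pv_best_eq_foldl (name : String) :
    infer_int_range_alt name
      = PySem.List.pyGetD pvRanges ((pvCands (PySem.Str.lower name)).foldl min 5) (0, 0) := by
  unfold infer_int_range_alt pvCands
  simp only [PySem.List.pyRange_one, List.foldl_map, PySem.Str.len_eq]
  simp only [pv_foldl_match_filterMap, Int.sub_zero, Int.toNat_natCast, zero_add,
    ← List.foldl_flatMap]

-- a priority is offered by B's scan iff some keyword with that priority occurs in n
lemma pv_mem_cands_iff (n : String) (p : Int) :
    p ∈ pvCands n ↔ ∃ kw, (kw, p) ∈ pvPairs ∧ PySem.Str.isIn kw n = true := by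
  unfold pvCands
  simp only [List.mem_flatMap, List.mem_filterMap, List.mem_range, pvKW_get?_iff]
  constructor
  · rintro ⟨k, hk, L, hL, hmem⟩
    refine ⟨_, hmem, ?_⟩
    have hL0 : 0 ≤ L := by
      revert hL; simp [pvLens]; rintro (rfl|rfl|rfl|rfl|rfl|rfl) <;> norm_num
    have htl : (PySem.Str.slice n (some (k : Int)) (some ((k : Int) + L))).toList
        = (n.toList.drop k).take (((k : Int) + L).toNat - k) := by
      simp [PySem.Str.toList_slice]
      rw [PySem.List.slice_toNat _ (by positivity) (by omega)]
      simp
    rw [PySem.Str.isIn_iff_infix, htl]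
    exact ((List.take_prefix _ _).isInfix).trans ((List.drop_suffix _ _).isInfix)
  · rintro ⟨kw, hmem, hin⟩
    obtain ⟨hne, hlen, -, -⟩ := pvPairs_facts _ hmem
    rw [PySem.Str.isIn_iff_infix] at hin
    obtain ⟨j, hpre⟩ := (PySem.Chars.exists_prefix_drop_iff_isIn kw.toList n.toList).mpr
      ((PySem.Chars.isIn_iff_infix _ _).mpr hin)
    have hj : j < n.toList.length := by
      by_contra hge
      rw [List.drop_eq_nil_of_le (Nat.le_of_not_lt hge)] at hpre
      exact hne (List.prefix_nil.mp hpre)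
    refine ⟨j, hj, (kw.toList.length : Int), hlen, ?_⟩
    have hs : PySem.Str.slice n (some (j : Int)) (some ((j : Int) + (kw.toList.length : Int))) = kw := by
      apply String.toList_injective
      simp only [PySem.Str.toList_slice, PySem.Chars.slice_eq_listSlice, PySem.List.slice_natCast_add]
      exact (List.prefix_iff_eq_take.mp hpre).symm
    rw [hs]
    exact hmem

-- which group each table pair belongs to
lemma pv_group_of_mem : ∀ pr ∈ pvPairs,
    (pr.2 = 0 ∧ pr.1 = "age") ∨
    (pr.2 = 1 ∧ pr.1 ∈ ["amount", "price", "total", "cost", "balance", "fee",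
                        "salary", "revenue", "income", "expense"]) ∨
    (pr.2 = 2 ∧ pr.1 ∈ ["count", "qty", "quantity", "num", "items"]) ∨
    (pr.2 = 3 ∧ pr.1 ∈ ["rank", "level", "score"]) ∨
    (pr.2 = 4 ∧ pr.1 = "year") := by decide

lemma pv_mem_money : ∀ kw ∈ ["amount", "price", "total", "cost", "balance", "fee",
    "salary", "revenue", "income", "expense"], (kw, (1 : Int)) ∈ pvPairs := by decide

lemma pv_mem_count : ∀ kw ∈ ["count", "qty", "quantity", "num", "items"], (kw, (2 : Int)) ∈ pvPairs := by decide

lemma pv_mem_rank : ∀ kw ∈ ["rank", "level", "score"], (kw, (3 : Int)) ∈ pvPairs := by decide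

-- the same, spelled with A's group tests
lemma pv_mem_cands_iff' (n : String) (p : Int) :
    p ∈ pvCands n ↔
      (p = 0 ∧ PySem.Str.isIn "age" n = true) ∨
      (p = 1 ∧ (["amount", "price", "total", "cost", "balance", "fee",
                 "salary", "revenue", "income", "expense"].any (fun k => PySem.Str.isIn k n)) = true) ∨
      (p = 2 ∧ (["count", "qty", "quantity", "num", "items"].any (fun k => PySem.Str.isIn k n)) = true) ∨
      (p = 3 ∧ (["rank", "level", "score"].any (fun k => PySem.Str.isIn k n)) = true) ∨
      (p = 4 ∧ PySem.Str.isIn "year" n = true) := by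
  rw [pv_mem_cands_iff]
  constructor
  · rintro ⟨kw, hmem, hin⟩
    rcases pv_group_of_mem _ hmem with ⟨hp, hk⟩|⟨hp, hk⟩|⟨hp, hk⟩|⟨hp, hk⟩|⟨hp, hk⟩
    · exact Or.inl ⟨hp, by rwa [show kw = "age" from hk] at hin⟩
    · exact Or.inr (Or.inl ⟨hp, List.any_eq_true.mpr ⟨kw, hk, hin⟩⟩)
    · exact Or.inr (Or.inr (Or.inl ⟨hp, List.any_eq_true.mpr ⟨kw, hk, hin⟩⟩))
    · exact Or.inr (Or.inr (Or.inr (Or.inl ⟨hp, List.any_eq_true.mpr ⟨kw, hk, hin⟩⟩)))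
    · exact Or.inr (Or.inr (Or.inr (Or.inr ⟨hp, by rwa [show kw = "year" from hk] at hin⟩)))
  · rintro (⟨rfl, h⟩|⟨rfl, h⟩|⟨rfl, h⟩|⟨rfl, h⟩|⟨rfl, h⟩)
    · exact ⟨"age", by decide, h⟩
    · obtain ⟨kw, hk, hin⟩ := List.any_eq_true.mp h
      exact ⟨kw, pv_mem_money _ hk, hin⟩
    · obtain ⟨kw, hk, hin⟩ := List.any_eq_true.mp h
      exact ⟨kw, pv_mem_count _ hk, hin⟩
    · obtain ⟨kw, hk, hin⟩ := List.any_eq_true.mp h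
      exact ⟨kw, pv_mem_rank _ hk, hin⟩
    · exact ⟨"year", by decide, h⟩

-- ===== VERDICT (by name: the statement is the Claim_ definition above) =====
theorem infer_int_range_spec : Claim_equal_infer_int_range := by
  intro name _
  unfold Spec_infer_int_range
  rw [pv_best_eq_foldl]
  unfold infer_int_range is_money_field lname
  set n := PySem.Str.lower name with hn
  set m := (pvCands n).foldl min 5 with hm
  have h5 : m ≤ 5 := (PySem.List.foldl_min_le (pvCands n) 5).1
  have hle : ∀ p ∈ pvCands n, m ≤ p := (PySem.List.foldl_min_le (pvCands n) 5).2
  have hm5 : m = 5 ∨ m ∈ pvCands n := PySem.List.foldl_min_mem (pvCands n) 5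
  have h0 : 0 ≤ m := by
    rcases hm5 with h | h
    · omega
    · rcases (pv_mem_cands_iff' n m).mp h with ⟨h1, -⟩|⟨h1, -⟩|⟨h1, -⟩|⟨h1, -⟩|⟨h1, -⟩ <;> omega
  by_cases hG0 : PySem.Str.isIn "age" n = true
  · have hc : (0 : Int) ∈ pvCands n := (pv_mem_cands_iff' n 0).mpr (Or.inl ⟨rfl, hG0⟩)
    have hm0 : m = 0 := le_antisymm (hle 0 hc) h0
    simp only [hG0, if_true]
    rw [hm0]
    decide
  · by_cases hG1 : (["amount", "price", "total", "cost", "balance", "fee",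
        "salary", "revenue", "income", "expense"].any (fun k => PySem.Str.isIn k n)) = true
    · have hc : (1 : Int) ∈ pvCands n := (pv_mem_cands_iff' n 1).mpr (Or.inr (Or.inl ⟨rfl, hG1⟩))
      have hm1 : m = 1 := by
        have hub := hle 1 hc
        rcases hm5 with h | h
        · omega
        · rcases (pv_mem_cands_iff' n m).mp h with ⟨h1, h2⟩|⟨h1, -⟩|⟨h1, -⟩|⟨h1, -⟩|⟨h1, -⟩ <;>
            first | exact absurd h2 hG0 | omega
      simp only [Bool.not_eq_true] at hG0
      simp only [hG0, hG1, if_true, Bool.false_eq_true, if_false]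
      rw [hm1]
      decide
    · by_cases hG2 : (["count", "qty", "quantity", "num", "items"].any (fun k => PySem.Str.isIn k n)) = true
      · have hc : (2 : Int) ∈ pvCands n := (pv_mem_cands_iff' n 2).mpr (Or.inr (Or.inr (Or.inl ⟨rfl, hG2⟩)))
        have hm2 : m = 2 := by
          have hub := hle 2 hc
          rcases hm5 with h | h
          · omega
          · rcases (pv_mem_cands_iff' n m).mp h with ⟨h1, h2⟩|⟨h1, h2⟩|⟨h1, -⟩|⟨h1, -⟩|⟨h1, -⟩
            · exact absurd h2 hG0
            · exact absurd h2 hG1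
            · omega
            · omega
            · omega
        simp only [Bool.not_eq_true] at hG0 hG1
        simp only [hG0, hG1, hG2, if_true, Bool.false_eq_true, if_false]
        rw [hm2]
        decide
      · by_cases hG3 : (["rank", "level", "score"].any (fun k => PySem.Str.isIn k n)) = true
        · have hc : (3 : Int) ∈ pvCands n :=
            (pv_mem_cands_iff' n 3).mpr (Or.inr (Or.inr (Or.inr (Or.inl ⟨rfl, hG3⟩))))
          have hm3 : m = 3 := by
            have hub := hle 3 hc
            rcases hm5 with h | h
            · omega
            · rcases (pv_mem_cands_iff' n m).mp h with ⟨h1, h2⟩|⟨h1, h2⟩|⟨h1, h2⟩|⟨h1, -⟩|⟨h1, -⟩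
              · exact absurd h2 hG0
              · exact absurd h2 hG1
              · exact absurd h2 hG2
              · omega
              · omega
          simp only [Bool.not_eq_true] at hG0 hG1 hG2
          simp only [hG0, hG1, hG2, hG3, if_true, Bool.false_eq_true, if_false]
          rw [hm3]
          decide
        · by_cases hG4 : PySem.Str.isIn "year" n = true
          · have hc : (4 : Int) ∈ pvCands n :=
              (pv_mem_cands_iff' n 4).mpr (Or.inr (Or.inr (Or.inr (Or.inr ⟨rfl, hG4⟩))))
            have hm4 : m = 4 := by
              have hub := hle 4 hc
              rcases hm5 with h | h
              · omega
              · rcases (pv_mem_cands_iff' n m).mp h with ⟨h1, h2⟩|⟨h1, h2⟩|⟨h1, h2⟩|⟨h1, h2⟩|⟨h1, -⟩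
                · exact absurd h2 hG0
                · exact absurd h2 hG1
                · exact absurd h2 hG2
                · exact absurd h2 hG3
                · omega
            simp only [Bool.not_eq_true] at hG0 hG1 hG2 hG3
            simp only [hG0, hG1, hG2, hG3, hG4, if_true, Bool.false_eq_true, if_false]
            rw [hm4]
            decide
          · have hm5' : m = 5 := by
              rcases hm5 with h | h
              · exact h
              · rcases (pv_mem_cands_iff' n m).mp h with ⟨h1, h2⟩|⟨h1, h2⟩|⟨h1, h2⟩|⟨h1, h2⟩|⟨h1, h2⟩
                · exact absurd h2 hG0
                · exact absurd h2 hG1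
                · exact absurd h2 hG2
                · exact absurd h2 hG3
                · exact absurd h2 hG4
            simp only [Bool.not_eq_true] at hG0 hG1 hG2 hG3 hG4
            simp only [hG0, hG1, hG2, hG3, hG4, Bool.false_eq_true, if_false]
            rw [hm5']
            decide
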